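-- pv_equiv track=rewrite | github.com/radosavlevici210/CodeCraftStudio1 | security/rados_security.py | sanitize_user_input
-- ===== SOURCE A (Python) =====
-- def sanitize_user_input(user_input):
--     """Sanitize user input to prevent injection attacks"""
--     if not user_input:
--         return ""
--
--     # Remove potentially dangerous characters
--     dangerous_chars = ['<', '>', '"', "'", '&', '`', '|', ';']
--     sanitized = str(user_input)
--
--     for char in dangerous_chars:
--         sanitized = sanitized.replace(char, '')
--
--     # Limit length
--     sanitized = sanitized[:1000]
--
--     return sanitized.strip()
-- ===== SOURCE B (Python) =====
-- DANGEROUS = frozenset('<>"\'&`|;')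
--
-- def sanitize_user_input(user_input):
--     """Sanitize user input to prevent injection attacks"""
--     if not user_input:
--         return ""
--     return ''.join(c for c in str(user_input) if c not in DANGEROUS)[:1000].strip()
-- ===== Notes on version B (the rewrite author's own statement) =====
-- stated objective: idiomatic
-- what changed: Replaces eight sequential full-string .replace() passes with a single character-filter pass against a frozenset, then truncates and strips.
import Mathlib
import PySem

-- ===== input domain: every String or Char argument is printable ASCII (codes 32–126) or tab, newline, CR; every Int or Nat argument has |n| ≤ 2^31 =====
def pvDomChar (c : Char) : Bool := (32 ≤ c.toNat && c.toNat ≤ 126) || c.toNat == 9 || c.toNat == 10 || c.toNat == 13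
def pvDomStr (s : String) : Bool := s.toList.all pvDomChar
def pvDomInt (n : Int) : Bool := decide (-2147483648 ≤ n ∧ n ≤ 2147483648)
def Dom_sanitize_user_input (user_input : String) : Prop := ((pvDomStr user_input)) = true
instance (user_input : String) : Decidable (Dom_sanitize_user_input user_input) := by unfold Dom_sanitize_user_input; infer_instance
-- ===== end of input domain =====

-- B replaces A's eight sequential full-string .replace() passes by one character-filter
-- pass against a set of dangerous characters (idiomatic; return value only).

-- ===== PORT A =====
def sanitize_user_input (user_input : String) : String :=
  if user_input == "" then ""
  else
    let dangerous_chars : List String := ["<", ">", "\"", "'", "&", "`", "|", ";"]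
    let sanitized := user_input
    let sanitized := dangerous_chars.foldl (fun acc ch => PySem.Str.replace acc ch "") sanitized
    let sanitized := PySem.Str.slice sanitized none (some 1000)
    PySem.Str.strip sanitized

-- ===== PORT B =====
def pvDangerousSet : List Char := ['<', '>', '"', '\'', '&', '`', '|', ';']

def sanitize_user_input_alt (user_input : String) : String :=
  if user_input == "" then ""
  else
    PySem.Str.strip
      (PySem.Str.slice
        (String.ofList (user_input.toList.filter (fun c => !(pvDangerousSet.contains c))))
        none (some 1000))

-- ===== PRECONDITION & SPEC =====
def Spec_sanitize_user_input (user_input : String) (out : String) : Prop := out = sanitize_user_input_alt user_input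
instance (user_input : String) (out : String) : Decidable (Spec_sanitize_user_input user_input out) := by unfold Spec_sanitize_user_input; infer_instance

-- ===== CLAIM (what is proved, stated in full; the proofs are below) =====
def Claim_equal_sanitize_user_input : Prop := ∀ (user_input : String), Dom_sanitize_user_input user_input → Spec_sanitize_user_input user_input (sanitize_user_input user_input)

-- ===== LEMMAS AND PROOFS =====

lemma replace_go_single (c : Char) (l acc : List Char) (fuel : Nat) (h : l.length ≤ fuel) :
    PySem.Chars.replace.go [c] [] fuel l acc = acc.reverse ++ l.filter (fun x => x != c) := by
  induction l generalizing fuel acc with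
  | nil =>
    cases fuel with
    | zero => simp [PySem.Chars.replace.go]
    | succ n => simp [PySem.Chars.replace.go]
  | cons c' t ih =>
    cases fuel with
    | zero => simp at h
    | succ n =>
      rw [PySem.Chars.replace.go]
      by_cases hc : c' = c
      · subst hc
        simp [List.isPrefixOf, ih _ _ (by simpa using h)]
      · have hpre : [c].isPrefixOf (c' :: t) = false := by
          simp [List.isPrefixOf]
          exact fun h2 => hc h2.symm
        simp [hpre, ih _ _ (by simpa using h), List.filter, show (c' != c) = true by simp [hc]]

lemma chars_replace_single (c : Char) (l : List Char) :
    PySem.Chars.replace l [c] [] = l.filter (fun x => x != c) := by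
  rw [PySem.Chars.replace]
  simp [replace_go_single c l [] l.length le_rfl]

lemma str_replace_single (c : Char) (s : String)
    (h : (String.ofList [c]).toList = [c]) :
    PySem.Str.replace s (String.ofList [c]) "" =
      String.ofList (s.toList.filter (fun x => x != c)) := by
  rw [PySem.Str.replace, h]
  simp [chars_replace_single]

theorem sanitize_user_input_spec : Claim_equal_sanitize_user_input := by
  intro s _
  unfold Spec_sanitize_user_input sanitize_user_input sanitize_user_input_alt
  by_cases hs : s == ""
  · simp [hs]
  · simp only [hs, if_false, Bool.false_eq_true]
    have r : ∀ (c : Char) (t : String), PySem.Str.replace t (String.ofList [c]) "" =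
        String.ofList (t.toList.filter (fun x => x != c)) := fun c t =>
      str_replace_single c t (by simp)
    have key : (["<", ">", "\"", "'", "&", "`", "|", ";"] : List String).foldl
        (fun acc ch => PySem.Str.replace acc ch "") s =
        String.ofList (s.toList.filter (fun c => !(pvDangerousSet.contains c))) := by
      simp only [List.foldl]
      rw [show ("<" : String) = String.ofList ['<'] by decide,
          show (">" : String) = String.ofList ['>'] by decide,
          show ("\"" : String) = String.ofList ['"'] by decide,
          show ("'" : String) = String.ofList ['\''] by decide,
          show ("&" : String) = String.ofList ['&'] by decide,
          show ("`" : String) = String.ofList ['`'] by decide,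
          show ("|" : String) = String.ofList ['|'] by decide,
          show (";" : String) = String.ofList [';'] by decide]
      simp only [r, String.toList_ofList, List.filter_filter]
      congr 1
      congr 1
      funext x
      simp only [pvDangerousSet, List.contains_cons, List.contains_nil, bne, Bool.or_false,
        Bool.not_or, Bool.and_comm, Bool.and_assoc, Bool.and_left_comm]
    rw [key]
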